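-- pv_equiv track=rewrite | github.com/juliawqy/IntroToProg | Lab Tests/Past Year Pracs/Lab Test 1 (AY2020-21 T1)/q4b.py | trace_contacts_2
-- ===== SOURCE A (Python) =====
-- def trace_contacts_2(patient, history, m, n):
--     # Replace the code below with your implementation.
--
--     list_infected_w_days = []
--     list_infected = []
--
--     for history_list in history:
--         for i in range(-m,0):
--             if patient in history_list and history_list[2] >= i:
--                 if history_list[0] == patient and history_list[1] not in list_infected:
--                     list_infected_w_days = list_infected_w_days + [(history_list[1], history_list[2])]
--                     list_infected = list_infected + [history_list[1]]
--                 elif history_list[1] == patient and history_list[0] not in list_infected: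
--                     list_infected_w_days = list_infected_w_days + [(history_list[0], history_list[2])]
--                     list_infected = list_infected + [history_list[0]]
--
--     first_list_infected = []
--
--     for j in range(len(history)*len(history)):
--         if list_infected != first_list_infected:
--             first_list_infected = list_infected
--             for index_infected in range(len(list_infected_w_days)):
--                 day_0 = list_infected_w_days[index_infected][1]
--                 for history_list in history:
--                     for k in range(day_0+(n-m),0):
--                         if patient in history_list:
--                             continue
--                         elif list_infected_w_days[index_infected][0] in history_list and history_list[2] >= k:
--                             if history_list[0] == list_infected_w_days[index_infected][0] and history_list[1] not in list_infected:
--                                 list_infected_w_days = list_infected_w_days + [(history_list[1], history_list[2])]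
--                                 list_infected = list_infected + [history_list[1]]
--                             elif history_list[1] == list_infected_w_days[index_infected][0] and history_list[0] not in list_infected:
--                                 list_infected_w_days = list_infected_w_days + [(history_list[0], history_list[2])]
--                                 list_infected = list_infected + [history_list[0]]
--
--         else:
--             break
--
--
--
--
--
--     return list_infected
-- ===== SOURCE B (Python) =====
-- def trace_contacts_2(patient, history, m, n):
--     # Worklist BFS: each infected person is processed exactly once, with a direct
--     # day-threshold comparison instead of scanning a range of days.
--     infected = []          # queue of (name, day-of-infection), in infection order
--     seen = []              # names already infected, in the same order
--     if m >= 1: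
--         for rec in history:
--             a, b, d = rec[0], rec[1], rec[2]
--             if d >= -m:
--                 if a == patient and b not in seen:
--                     infected.append((b, d))
--                     seen.append(b)
--                 elif b == patient and a not in seen:
--                     infected.append((a, d))
--                     seen.append(a)
--     i = 0
--     while i < len(infected):
--         c, day0 = infected[i]
--         i += 1
--         t = day0 + (n - m)
--         if t < 0:
--             for rec in history:
--                 a, b, d = rec[0], rec[1], rec[2]
--                 if a == patient or b == patient:
--                     continue
--                 if d >= t:
--                     if a == c and b not in seen:
--                         infected.append((b, d))
--                         seen.append(b)
--                     elif b == c and a not in seen: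
--                         infected.append((a, d))
--                         seen.append(a)
--     return seen
-- ===== Notes on version B (the rewrite author's own statement) =====
-- stated objective: faster
-- what changed: B replaces A's quadratic rounds of full re-scans (each guarded by per-day range(-m,0) and range(day0+n-m,0) loops) with a single worklist BFS that processes each infected person exactly once and tests the day threshold by one comparison.
import Mathlib
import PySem

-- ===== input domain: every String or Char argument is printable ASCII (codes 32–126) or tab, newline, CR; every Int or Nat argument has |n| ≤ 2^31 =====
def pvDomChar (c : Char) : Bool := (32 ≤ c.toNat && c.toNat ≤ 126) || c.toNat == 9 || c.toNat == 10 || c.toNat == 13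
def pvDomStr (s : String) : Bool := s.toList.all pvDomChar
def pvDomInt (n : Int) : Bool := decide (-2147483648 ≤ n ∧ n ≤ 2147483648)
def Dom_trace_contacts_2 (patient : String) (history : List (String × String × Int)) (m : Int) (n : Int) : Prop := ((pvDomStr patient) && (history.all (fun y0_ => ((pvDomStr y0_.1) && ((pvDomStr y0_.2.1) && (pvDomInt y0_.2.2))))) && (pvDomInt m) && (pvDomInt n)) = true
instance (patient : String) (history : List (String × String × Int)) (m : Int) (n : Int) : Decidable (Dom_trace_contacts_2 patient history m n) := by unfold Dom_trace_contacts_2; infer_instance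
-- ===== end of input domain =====

-- B is a worklist BFS that processes each infected person once with a direct day-threshold
-- comparison, replacing A's repeated full re-scans and per-day range loops (objective: faster).

-- shared helper: the infect-or-skip block that both Python sources repeat verbatim
-- ('if hl[0] == c and hl[1] not in list_infected: … elif hl[1] == c and hl[0] not in …: …')
def pvInfect (c : String) (e : String × String × Int)
    (s : List (String × Int) × List String) : List (String × Int) × List String :=
  if e.1 == c && !(s.2.contains e.2.1) then (s.1 ++ [(e.2.1, e.2.2)], s.2 ++ [e.2.1])
  else if e.2.1 == c && !(s.2.contains e.1) then (s.1 ++ [(e.1, e.2.2)], s.2 ++ [e.1])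
  else s

-- ===== PORT A =====
-- 'x in history_list' on a (str, str, int) tuple: the int component never equals a string
def pvMem (x : String) (e : String × String × Int) : Bool := x == e.1 || x == e.2.1

-- one iteration of A's j-loop body (the three nested loops over the snapshot indices,
-- history, and range(day_0+(n-m), 0)); reads go through the current, growing list
def aRound (patient : String) (history : List (String × String × Int)) (m n : Int)
    (s : List (String × Int) × List String) : List (String × Int) × List String :=
  (PySem.List.pyRange 0 (s.1.length : Int) 1).foldl (fun s idx =>
    let day0 := (PySem.List.pyGetD s.1 idx ("", 0)).2
    history.foldl (fun s e =>
      (PySem.List.pyRange (day0 + (n - m)) 0 1).foldl (fun s k =>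
        if pvMem patient e then s   -- 'continue'
        else
          let c := (PySem.List.pyGetD s.1 idx ("", 0)).1
          if pvMem c e && decide (k ≤ e.2.2) then pvInfect c e s else s) s) s) s

-- A's 'for j in range(len(history)*len(history))' with its 'break'
def aMain (patient : String) (history : List (String × String × Int)) (m n : Int) :
    Nat → List String → List (String × Int) × List String → List String
  | 0, _, s => s.2
  | fuel + 1, first, s =>
      if s.2 ≠ first then aMain patient history m n fuel s.2 (aRound patient history m n s)
      else s.2

def trace_contacts_2 (patient : String) (history : List (String × String × Int)) (m : Int) (n : Int) : List String :=
  let s0 := history.foldl (fun s e =>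
      (PySem.List.pyRange (-m) 0 1).foldl (fun s i =>
        if pvMem patient e && decide (i ≤ e.2.2) then pvInfect patient e s else s) s)
    (([] : List (String × Int)), ([] : List String))
  aMain patient history m n (history.length * history.length) [] s0

-- ===== PORT B =====
-- processing of one queue element (c, day0) in Source B's while loop: one direct-threshold scan
def bSpread (patient : String) (history : List (String × String × Int)) (c : String) (t : Int)
    (s : List (String × Int) × List String) : List (String × Int) × List String :=
  if t < 0 then
    history.foldl (fun s e =>
      if e.1 == patient || e.2.1 == patient then s
      else if decide (t ≤ e.2.2) then pvInfect c e s else s) s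
  else s

-- names that phase-2 spreading can ever add (endpoints of entries not containing the patient);
-- used only as a termination measure for bgo below
def spreadNames (patient : String) (history : List (String × String × Int)) : List String :=
  (history.filter (fun e => !(e.1 == patient || e.2.1 == patient))).flatMap (fun e => [e.1, e.2.1])

lemma pvInfect_shape (c : String) (e : String × String × Int)
    (s : List (String × Int) × List String) :
    ∃ new : List (String × Int),
      pvInfect c e s = (s.1 ++ new, s.2 ++ new.map Prod.fst) ∧ new.length ≤ 1 ∧
      ∀ q ∈ new, (q.1 = e.1 ∨ q.1 = e.2.1) ∧ s.2.contains q.1 = false := by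
  unfold pvInfect
  split_ifs with h1 h2
  · exact ⟨[(e.2.1, e.2.2)], by simp, by simp, by
      intro q hq; simp at hq; subst hq
      simp_all⟩
  · exact ⟨[(e.1, e.2.2)], by simp, by simp, by
      intro q hq; simp at hq; subst hq
      simp_all⟩
  · exact ⟨[], by simp, by simp, by simp⟩

lemma mem_spreadNames (patient : String) (history0 : List (String × String × Int))
    (e : String × String × Int) (x : String) (he : e ∈ history0)
    (hp : (e.1 == patient || e.2.1 == patient) = false) (hx : x = e.1 ∨ x = e.2.1) :
    x ∈ spreadNames patient history0 := by
  unfold spreadNames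
  refine List.mem_flatMap.mpr ⟨e, List.mem_filter.mpr ⟨he, by simp [hp]⟩, ?_⟩
  rcases hx with h | h <;> simp [h]

lemma bSpread_fold_shape (patient : String) (history0 : List (String × String × Int))
    (c : String) (t : Int) (hist : List (String × String × Int))
    (hsub : ∀ e ∈ hist, e ∈ history0) (s : List (String × Int) × List String) :
    ∃ new : List (String × Int),
      hist.foldl (fun s e =>
        if e.1 == patient || e.2.1 == patient then s
        else if decide (t ≤ e.2.2) then pvInfect c e s else s) s
        = (s.1 ++ new, s.2 ++ new.map Prod.fst) ∧
      new.length ≤ hist.length ∧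
      ∀ q ∈ new, q.1 ∈ spreadNames patient history0 ∧ s.2.contains q.1 = false := by
  induction hist generalizing s with
  | nil => exact ⟨[], by simp, by simp, by simp⟩
  | cons e hs ih =>
    have hsub' : ∀ e' ∈ hs, e' ∈ history0 := fun e' he' => hsub e' (List.mem_cons_of_mem _ he')
    by_cases hp : (e.1 == patient || e.2.1 == patient) = true
    · obtain ⟨new, h1, h2, h3⟩ := ih hsub' s
      refine ⟨new, ?_, by simp only [List.length_cons]; omega, h3⟩
      rw [List.foldl_cons, if_pos hp]; exact h1
    · have hpf : (e.1 == patient || e.2.1 == patient) = false := by simpa using hp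
      by_cases ht : t ≤ e.2.2
      · obtain ⟨ne1, g1, g2, g3⟩ := pvInfect_shape c e s
        obtain ⟨new, h1, h2, h3⟩ := ih hsub' (pvInfect c e s)
        refine ⟨ne1 ++ new, ?_, ?_, ?_⟩
        · rw [List.foldl_cons, if_neg hp, if_pos (by simpa using ht)]
          rw [h1, g1]
          simp [List.append_assoc]
        · simp only [List.length_append, List.length_cons]; omega
        · intro q hq
          rcases List.mem_append.mp hq with hq | hq
          · obtain ⟨hq1, hq2⟩ := g3 q hq
            exact ⟨mem_spreadNames patient history0 e q.1 (hsub e List.mem_cons_self) hpf hq1, hq2⟩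
          · obtain ⟨hq1, hq2⟩ := h3 q hq
            rw [g1] at hq2
            simp only [List.contains_eq_mem, decide_eq_false_iff_not, List.mem_append,
              not_or] at hq2 ⊢
            exact ⟨hq1, hq2.1⟩
      · obtain ⟨new, h1, h2, h3⟩ := ih hsub' s
        refine ⟨new, ?_, by simp only [List.length_cons]; omega, h3⟩
        rw [List.foldl_cons, if_neg hp, if_neg (by simpa using ht)]; exact h1

lemma bSpread_shape (patient : String) (history : List (String × String × Int)) (c : String)
    (t : Int) (s : List (String × Int) × List String) :
    ∃ new : List (String × Int),
      bSpread patient history c t s = (s.1 ++ new, s.2 ++ new.map Prod.fst) ∧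
      new.length ≤ history.length ∧
      ∀ q ∈ new, q.1 ∈ spreadNames patient history ∧ s.2.contains q.1 = false := by
  unfold bSpread
  by_cases hlt : t < 0
  · simpa [hlt] using bSpread_fold_shape patient history c t history (fun e he => he) s
  · exact ⟨[], by simp [hlt], by simp, by simp⟩

lemma countP_lt_of_witness {l : List String} {p q : String → Bool}
    (hmono : ∀ x ∈ l, q x = true → p x = true) (x : String) (hx : x ∈ l)
    (hqx : q x = false) (hpx : p x = true) : l.countP q < l.countP p := by
  induction l with
  | nil => simp at hx
  | cons a l ih =>
    rcases List.mem_cons.mp hx with hx | hx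
    · subst hx
      simp [hqx, hpx]
      have : l.countP q ≤ l.countP p :=
        List.countP_mono_left (fun y hy => hmono y (List.mem_cons_of_mem _ hy))
      omega
    · have h1 : l.countP q < l.countP p :=
        ih (fun y hy => hmono y (List.mem_cons_of_mem _ hy)) hx
      simp only [List.countP_cons]
      by_cases hqa : q a = true
      · have := hmono a List.mem_cons_self hqa
        simp [hqa, this]; omega
      · simp only [Bool.not_eq_true] at hqa
        simp [hqa]; split <;> omega

-- Source B's 'while i < len(infected)': pending is the unprocessed suffix infected[i:],
-- s.1 the whole queue, s.2 the seen-list; new infections are appended to both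
def bgo (patient : String) (history : List (String × String × Int)) (m n : Int)
    (pending : List (String × Int)) (s : List (String × Int) × List String) : List String :=
  match pending with
  | [] => s.2
  | (c, day0) :: rest =>
      let s' := bSpread patient history c (day0 + (n - m)) s
      bgo patient history m n (rest ++ s'.1.drop s.1.length) s'
termination_by (spreadNames patient history).countP (fun x => !s.2.contains x) * (history.length + 1) + pending.length
decreasing_by
  obtain ⟨new, h1, h2, h3⟩ := bSpread_shape patient history c (day0 + (n - m)) s
  simp only [h1, List.drop_left]
  rcases List.eq_nil_or_concat' new with hnil | ⟨_, _, hcat⟩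
  · subst hnil; simp
  · have hne : new ≠ [] := by subst hcat; simp
    have hhead : new.head hne ∈ new := List.head_mem hne
    obtain ⟨hxin, hxnot⟩ := h3 _ hhead
    have hmono : ∀ x ∈ spreadNames patient history,
        (!(s.2 ++ new.map Prod.fst).contains x) = true → (!s.2.contains x) = true := by
      intro x _ hx
      simp only [Bool.not_eq_true', List.contains_eq_mem, decide_eq_false_iff_not,
        List.mem_append, not_or] at hx ⊢
      exact hx.1
    have hlt : (spreadNames patient history).countP (fun x => !(s.2 ++ new.map Prod.fst).contains x)
        < (spreadNames patient history).countP (fun x => !s.2.contains x) := by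
      refine countP_lt_of_witness hmono (new.head hne).1 hxin ?_ ?_
      · have hmem : (new.head hne).1 ∈ s.2 ++ new.map Prod.fst :=
          List.mem_append_right _ (List.mem_map_of_mem hhead)
        simp [List.contains_eq_mem, hmem]
      · simpa [List.contains_eq_mem] using hxnot
    set Cn := (spreadNames patient history).countP (fun x => !(s.2 ++ new.map Prod.fst).contains x)
    set Co := (spreadNames patient history).countP (fun x => !s.2.contains x)
    have hle : (Cn + 1) * (history.length + 1) ≤ Co * (history.length + 1) :=
      Nat.mul_le_mul_right _ hlt
    have hexp : (Cn + 1) * (history.length + 1)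
        = Cn * (history.length + 1) + (history.length + 1) := by ring
    simp only [List.length_append, List.length_cons]
    omega

def trace_contacts_2_alt (patient : String) (history : List (String × String × Int)) (m : Int) (n : Int) : List String :=
  let s0 : List (String × Int) × List String :=
    if m ≥ 1 then
      history.foldl (fun s e =>
        if decide (-m ≤ e.2.2) then pvInfect patient e s else s) ([], [])
    else ([], [])
  bgo patient history m n s0.1 s0

-- ===== PRECONDITION & SPEC =====
def Spec_trace_contacts_2 (patient : String) (history : List (String × String × Int)) (m : Int) (n : Int) (out : List String) : Prop := out = trace_contacts_2_alt patient history m n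
instance (patient : String) (history : List (String × String × Int)) (m : Int) (n : Int) (out : List String) : Decidable (Spec_trace_contacts_2 patient history m n out) := by unfold Spec_trace_contacts_2; infer_instance

-- ===== CLAIM (what is proved, stated in full; the proofs are below) =====
def Claim_equal_trace_contacts_2 : Prop := ∀ (patient : String) (history : List (String × String × Int)) (m : Int) (n : Int), Dom_trace_contacts_2 patient history m n → Spec_trace_contacts_2 patient history m n (trace_contacts_2 patient history m n)

-- ===== LEMMAS AND PROOFS =====

-- the state type throughout: (list_infected_w_days, list_infected)

lemma foldl_fix {α β : Type} (f : β → α → β) (l : List α) (s : β) :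
    (∀ x ∈ l, f s x = s) → l.foldl f s = s := by
  induction l with
  | nil => intro _; rfl
  | cons a l ih =>
    intro h
    rw [List.foldl_cons, h a List.mem_cons_self]
    exact ih (fun x hx => h x (List.mem_cons_of_mem _ hx))

lemma pvInfect_not_mem (c : String) (e : String × String × Int)
    (s : List (String × Int) × List String) (h : pvMem c e = false) : pvInfect c e s = s := by
  unfold pvMem at h
  simp only [Bool.or_eq_false_iff, beq_eq_false_iff_ne, ne_eq] at h
  have h1 : (e.1 == c) = false := by simp [beq_eq_false_iff_ne]; exact fun hh => h.1 hh.symm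
  have h2 : (e.2.1 == c) = false := by simp [beq_eq_false_iff_ne]; exact fun hh => h.2 hh.symm
  simp [pvInfect, h1, h2]

lemma pvInfect_eq_self_iff (c : String) (e : String × String × Int)
    (s : List (String × Int) × List String) :
    pvInfect c e s = s ↔
      ((e.1 == c && !(s.2.contains e.2.1)) = false ∧ (e.2.1 == c && !(s.2.contains e.1)) = false) := by
  constructor
  · intro h
    by_cases c1 : (e.1 == c && !(s.2.contains e.2.1)) = true
    · rw [pvInfect, if_pos c1] at h
      have := congrArg (fun z => z.1.length) h
      simp at this
    · by_cases c2 : (e.2.1 == c && !(s.2.contains e.1)) = true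
      · rw [pvInfect, if_neg c1, if_pos c2] at h
        have := congrArg (fun z => z.1.length) h
        simp at this
      · exact ⟨by simpa using c1, by simpa using c2⟩
  · intro ⟨h1, h2⟩
    rw [pvInfect, if_neg (by rw [h1]; simp), if_neg (by rw [h2]; simp)]

lemma pvInfect_post1 (c : String) (e : String × String × Int)
    (s : List (String × Int) × List String) (h : e.1 = c) : e.2.1 ∈ (pvInfect c e s).2 := by
  unfold pvInfect
  split_ifs with c1 c2
  · simp
  · have hmem : e.2.1 ∈ s.2 := by
      by_contra hn
      exact c1 (by simp [h, List.contains_eq_mem, hn])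
    simp [hmem]
  · by_contra hn
    exact c1 (by simp [h, List.contains_eq_mem, hn])

lemma pvInfect_post2 (c : String) (e : String × String × Int)
    (s : List (String × Int) × List String) (h : e.2.1 = c) : e.1 ∈ (pvInfect c e s).2 := by
  unfold pvInfect
  split_ifs with c1 c2
  · have he : e.1 = e.2.1 := by
      have hc := c1
      simp only [Bool.and_eq_true, beq_iff_eq] at hc
      rw [hc.1, h]
    simp [he]
  · simp
  · by_contra hn
    exact c2 (by simp [h, List.contains_eq_mem, hn])

lemma pvInfect_idem (c : String) (e : String × String × Int)
    (s : List (String × Int) × List String) :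
    pvInfect c e (pvInfect c e s) = pvInfect c e s := by
  rw [pvInfect_eq_self_iff]
  constructor
  · by_cases h : e.1 = c
    · have := pvInfect_post1 c e s h
      simp [List.contains_eq_mem, this]
    · have hb : (e.1 == c) = false := by simpa using h
      simp [hb]
  · by_cases h : e.2.1 = c
    · have := pvInfect_post2 c e s h
      simp [List.contains_eq_mem, this]
    · have hb : (e.2.1 == c) = false := by simpa using h
      simp [hb]

lemma pvInfect_self_mono (c : String) (e : String × String × Int)
    {s s' : List (String × Int) × List String} (h : pvInfect c e s = s)
    (hsub : ∀ x ∈ s.2, x ∈ s'.2) : pvInfect c e s' = s' := by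
  rw [pvInfect_eq_self_iff] at h ⊢
  obtain ⟨h1, h2⟩ := h
  constructor
  · by_cases hc : e.1 = c
    · have hmem : e.2.1 ∈ s.2 := by
        by_contra hn
        rw [show (e.1 == c) = true by simpa using hc] at h1
        simp [List.contains_eq_mem, hn] at h1
      have := hsub _ hmem
      simp [List.contains_eq_mem, this]
    · have hb : (e.1 == c) = false := by simpa using hc
      simp [hb]
  · by_cases hc : e.2.1 = c
    · have hmem : e.1 ∈ s.2 := by
        by_contra hn
        rw [show (e.2.1 == c) = true by simpa using hc] at h2
        simp [List.contains_eq_mem, hn] at h2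
      have := hsub _ hmem
      simp [List.contains_eq_mem, this]
    · have hb : (e.2.1 == c) = false := by simpa using hc
      simp [hb]

lemma bfold_self_pointwise (patient : String) (c : String) (t : Int)
    (hist : List (String × String × Int)) :
    ∀ (s : List (String × Int) × List String),
    hist.foldl (fun s e =>
        if e.1 == patient || e.2.1 == patient then s
        else if decide (t ≤ e.2.2) then pvInfect c e s else s) s = s →
    ∀ e ∈ hist,
      (if e.1 == patient || e.2.1 == patient then s
       else if decide (t ≤ e.2.2) then pvInfect c e s else s) = s := by
  induction hist with
  | nil => intro s _ e he; simp at he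
  | cons a hs ih =>
    intro s h e he
    set g := fun (s : List (String × Int) × List String) (e : String × String × Int) =>
        if e.1 == patient || e.2.1 == patient then s
        else if decide (t ≤ e.2.2) then pvInfect c e s else s with hg
    have hstep : ∃ n1 : List (String × Int), g s a = (s.1 ++ n1, s.2 ++ n1.map Prod.fst) := by
      show ∃ n1 : List (String × Int),
        (if a.1 == patient || a.2.1 == patient then s
         else if decide (t ≤ a.2.2) then pvInfect c a s else s)
          = (s.1 ++ n1, s.2 ++ n1.map Prod.fst)
      split_ifs with hp ht
      · exact ⟨[], by simp⟩
      · exact (pvInfect_shape c a s).imp fun n h => h.1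
      · exact ⟨[], by simp⟩
    obtain ⟨n1, hn1⟩ := hstep
    obtain ⟨n2, hn2, -, -⟩ := bSpread_fold_shape patient hs c t hs (fun _ he => he) (g s a)
    have hfold : hs.foldl g (g s a) = s := h
    rw [hn2, hn1] at hfold
    have hlen : s.1.length + (n1.length + n2.length) = s.1.length := by
      have := congrArg (fun z => z.1.length) hfold
      simpa [List.length_append] using this
    have hn1nil : n1 = [] := List.eq_nil_of_length_eq_zero (by omega)
    have hgsa : g s a = s := by rw [hn1, hn1nil]; simp
    rw [List.foldl_cons, hgsa] at h
    rcases List.mem_cons.mp he with he | he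
    · subst he; exact hgsa
    · exact ih s h e he

lemma bSpread_self_mono (patient : String) (history : List (String × String × Int))
    (c : String) (t : Int) {s s' : List (String × Int) × List String}
    (h : bSpread patient history c t s = s) (hsub : ∀ x ∈ s.2, x ∈ s'.2) :
    bSpread patient history c t s' = s' := by
  unfold bSpread at h ⊢
  by_cases hlt : t < 0
  · rw [if_pos hlt] at h ⊢
    have hpt := bfold_self_pointwise patient c t history s h
    apply foldl_fix
    intro e he
    specialize hpt e he
    by_cases hp : (e.1 == patient || e.2.1 == patient) = true
    · simp [hp]
    · by_cases ht : t ≤ e.2.2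
      · rw [if_neg hp, if_pos (by simpa using ht)]
        rw [if_neg hp, if_pos (by simpa using ht)] at hpt
        exact pvInfect_self_mono c e hpt hsub
      · rw [if_neg hp, if_neg (by simpa using ht)]
  · rw [if_neg hlt]

-- after one pass over hist, every kept entry is saturated
lemma bfold_post (patient : String) (c : String) (t : Int)
    (hist : List (String × String × Int)) :
    ∀ (s : List (String × Int) × List String), ∀ e ∈ hist,
      (e.1 == patient || e.2.1 == patient) = false → t ≤ e.2.2 →
      pvInfect c e (hist.foldl (fun s e =>
          if e.1 == patient || e.2.1 == patient then s
          else if decide (t ≤ e.2.2) then pvInfect c e s else s) s)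
        = hist.foldl (fun s e =>
          if e.1 == patient || e.2.1 == patient then s
          else if decide (t ≤ e.2.2) then pvInfect c e s else s) s := by
  induction hist with
  | nil => intro s e he; simp at he
  | cons a hs ih =>
    intro s e he hp ht
    rw [List.foldl_cons]
    rcases List.mem_cons.mp he with he | he
    · subst he
      rw [if_neg (by simp [hp]), if_pos (by simpa using ht)]
      obtain ⟨new, h1, -, -⟩ := bSpread_fold_shape patient hs c t hs (fun _ h => h) (pvInfect c e s)
      rw [h1]
      rw [pvInfect_eq_self_iff]
      constructor
      · by_cases hc : e.1 = c
        · have hm := pvInfect_post1 c e s hc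
          have : e.2.1 ∈ (pvInfect c e s).2 ++ new.map Prod.fst := List.mem_append_left _ hm
          simp [List.contains_eq_mem, this]
        · have hb : (e.1 == c) = false := by simpa using hc
          simp [hb]
      · by_cases hc : e.2.1 = c
        · have hm := pvInfect_post2 c e s hc
          have : e.1 ∈ (pvInfect c e s).2 ++ new.map Prod.fst := List.mem_append_left _ hm
          simp [List.contains_eq_mem, this]
        · have hb : (e.2.1 == c) = false := by simpa using hc
          simp [hb]
    · exact ih _ e he hp ht

lemma bSpread_idem (patient : String) (history : List (String × String × Int))
    (c : String) (t : Int) (s : List (String × Int) × List String) :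
    bSpread patient history c t (bSpread patient history c t s) = bSpread patient history c t s := by
  by_cases hlt : t < 0
  · conv_lhs => rw [bSpread, if_pos hlt]
    apply foldl_fix
    intro e he
    by_cases hp : (e.1 == patient || e.2.1 == patient) = true
    · simp [hp]
    · by_cases ht : t ≤ e.2.2
      · rw [if_neg hp, if_pos (by simpa using ht)]
        conv_lhs => rw [bSpread, if_pos hlt]
        conv_rhs => rw [bSpread, if_pos hlt]
        exact bfold_post patient c t history s e he (by simpa using hp) ht
      · rw [if_neg hp, if_neg (by simpa using ht)]
  · rw [bSpread, if_neg hlt]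

-- sweeping a list of infected entries (the abstract content of one j-round of A)
def sweep (patient : String) (history : List (String × String × Int)) (m n : Int)
    (l : List (String × Int)) (s : List (String × Int) × List String) :
    List (String × Int) × List String :=
  l.foldl (fun s p => bSpread patient history p.1 (p.2 + (n - m)) s) s

lemma sweep_shape (patient : String) (history : List (String × String × Int)) (m n : Int)
    (l : List (String × Int)) :
    ∀ (s : List (String × Int) × List String),
    ∃ new : List (String × Int),
      sweep patient history m n l s = (s.1 ++ new, s.2 ++ new.map Prod.fst) ∧
      ∀ q ∈ new, q.1 ∈ spreadNames patient history ∧ s.2.contains q.1 = false := by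
  induction l with
  | nil => intro s; exact ⟨[], by simp [sweep], by simp⟩
  | cons p l ih =>
    intro s
    obtain ⟨n1, h1, -, h3⟩ := bSpread_shape patient history p.1 (p.2 + (n - m)) s
    obtain ⟨n2, g1, g3⟩ := ih (bSpread patient history p.1 (p.2 + (n - m)) s)
    refine ⟨n1 ++ n2, ?_, ?_⟩
    · show sweep patient history m n l (bSpread patient history p.1 (p.2 + (n - m)) s) = _
      rw [g1, h1]
      simp [List.append_assoc]
    · intro q hq
      rcases List.mem_append.mp hq with hq | hq
      · exact h3 q hq
      · obtain ⟨hq1, hq2⟩ := g3 q hq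
        rw [h1] at hq2
        simp only [List.contains_eq_mem, decide_eq_false_iff_not, List.mem_append, not_or] at hq2 ⊢
        exact ⟨hq1, hq2.1⟩

lemma sweep_mem (patient : String) (history : List (String × String × Int)) (m n : Int)
    (l : List (String × Int)) (s : List (String × Int) × List String) (x : String)
    (h : x ∈ s.2) : x ∈ (sweep patient history m n l s).2 := by
  obtain ⟨new, h1, -⟩ := sweep_shape patient history m n l s
  rw [h1]; exact List.mem_append_left _ h

lemma sweep_sat (patient : String) (history : List (String × String × Int)) (m n : Int)
    (l : List (String × Int)) :
    ∀ (s : List (String × Int) × List String), ∀ p ∈ l,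
      bSpread patient history p.1 (p.2 + (n - m)) (sweep patient history m n l s)
        = sweep patient history m n l s := by
  induction l with
  | nil => intro s p hp; simp at hp
  | cons a l ih =>
    intro s p hp
    have hrw : sweep patient history m n (a :: l) s
        = sweep patient history m n l (bSpread patient history a.1 (a.2 + (n - m)) s) := rfl
    rcases List.mem_cons.mp hp with hp | hp
    · subst hp
      rw [hrw]
      exact bSpread_self_mono patient history p.1 (p.2 + (n - m))
        (bSpread_idem patient history p.1 (p.2 + (n - m)) s)
        (fun x hx => sweep_mem _ _ _ _ _ _ _ hx)
    · rw [hrw]; exact ih _ p hp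

lemma sweep_fix (patient : String) (history : List (String × String × Int)) (m n : Int)
    (l : List (String × Int)) (s : List (String × Int) × List String)
    (h : ∀ p ∈ l, bSpread patient history p.1 (p.2 + (n - m)) s = s) :
    sweep patient history m n l s = s :=
  foldl_fix _ l s (fun p hp => h p hp)

lemma sweep_append (patient : String) (history : List (String × String × Int)) (m n : Int)
    (l1 l2 : List (String × Int)) (s : List (String × Int) × List String) :
    sweep patient history m n (l1 ++ l2) s
      = sweep patient history m n l2 (sweep patient history m n l1 s) :=
  List.foldl_append

-- bgo equations
lemma bgo_nil (patient : String) (history : List (String × String × Int)) (m n : Int)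
    (s : List (String × Int) × List String) : bgo patient history m n [] s = s.2 := by
  rw [bgo]

lemma bgo_cons (patient : String) (history : List (String × String × Int)) (m n : Int)
    (c : String) (day0 : Int) (rest : List (String × Int))
    (s : List (String × Int) × List String) :
    bgo patient history m n ((c, day0) :: rest) s
      = bgo patient history m n
          (rest ++ (bSpread patient history c (day0 + (n - m)) s).1.drop s.1.length)
          (bSpread patient history c (day0 + (n - m)) s) := by
  rw [bgo]

-- processing a worklist segment = sweeping it, then processing what it appended
lemma bgo_sweep (patient : String) (history : List (String × String × Int)) (m n : Int) :
    ∀ (pending extra : List (String × Int)) (s : List (String × Int) × List String),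
    bgo patient history m n (pending ++ extra) s
      = bgo patient history m n
          (extra ++ ((sweep patient history m n pending s).1.drop s.1.length))
          (sweep patient history m n pending s) := by
  intro pending
  induction pending with
  | nil =>
    intro extra s
    simp [sweep, List.drop_length]
  | cons p rest ih =>
    intro extra s
    obtain ⟨c, day0⟩ := p
    rw [List.cons_append, bgo_cons]
    set s1 := bSpread patient history c (day0 + (n - m)) s with hs1
    obtain ⟨n1, h1, -⟩ := bSpread_shape patient history c (day0 + (n - m)) s
    rw [← hs1] at h1
    have hd1 : s1.1.drop s.1.length = n1 := by rw [h1]; simp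
    have hsw : sweep patient history m n ((c, day0) :: rest) s = sweep patient history m n rest s1 := rfl
    obtain ⟨n2, g1, -⟩ := sweep_shape patient history m n rest s1
    have hd2 : (sweep patient history m n rest s1).1.drop s1.1.length = n2 := by rw [g1]; simp
    have hdelta : (sweep patient history m n rest s1).1.drop s.1.length = n1 ++ n2 := by
      rw [g1, h1]
      simp [List.append_assoc]
    rw [hd1, List.append_assoc, ih (extra ++ n1) s1, hsw, hdelta, hd2, List.append_assoc]

-- aMain equations
lemma aMain_zero (patient : String) (history : List (String × String × Int)) (m n : Int)
    (first : List String) (s : List (String × Int) × List String) :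
    aMain patient history m n 0 first s = s.2 := rfl

lemma aMain_succ (patient : String) (history : List (String × String × Int)) (m n : Int)
    (fuel : Nat) (first : List String) (s : List (String × Int) × List String) :
    aMain patient history m n (fuel + 1) first s
      = if s.2 ≠ first then aMain patient history m n fuel s.2 (aRound patient history m n s)
        else s.2 := rfl

-- ---------- collapsing A's inner day-range loops ----------

lemma fold_range_infect (c : String) (e : String × String × Int) (a : Int)
    (s : List (String × Int) × List String) :
    (PySem.List.pyRange a 0 1).foldl
        (fun s i => if pvMem c e && decide (i ≤ e.2.2) then pvInfect c e s else s) s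
    = if a < 0 ∧ a ≤ e.2.2 then pvInfect c e s else s := by
  by_cases ha : a < 0
  · by_cases hm : pvMem c e = true
    · by_cases hd : a ≤ e.2.2
      · rw [if_pos ⟨ha, hd⟩, PySem.List.pyRange_one_cons ha, List.foldl_cons,
          if_pos (by simp [hm, hd])]
        apply foldl_fix
        intro i _
        by_cases hg : (pvMem c e && decide (i ≤ e.2.2)) = true
        · rw [if_pos hg]; exact pvInfect_idem c e s
        · rw [if_neg hg]
      · rw [if_neg (by tauto)]
        apply foldl_fix
        intro i hi
        have : a ≤ i := (PySem.List.mem_pyRange_one.mp hi).1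
        rw [if_neg (by simp; intro _; omega)]
    · have hmf : pvMem c e = false := by simpa using hm
      rw [foldl_fix _ _ _ (fun i _ => by rw [if_neg (by simp [hmf])])]
      split
      · exact (pvInfect_not_mem c e s hmf).symm
      · rfl
  · rw [PySem.List.pyRange_one_eq_nil (by omega), if_neg (by tauto)]
    rfl

lemma pyGetD_append_left {α : Type} (l1 l2 : List α) (idx : Int) (d : α)
    (h0 : 0 ≤ idx) (h : idx < (l1.length : Int)) :
    PySem.List.pyGetD (l1 ++ l2) idx d = PySem.List.pyGetD l1 idx d := by
  rw [PySem.List.pyGetD_eq_getElem (l1 ++ l2) d h0 (by simp; omega),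
    PySem.List.pyGetD_eq_getElem l1 d h0 h]
  exact List.getElem_append_left (by omega)

lemma fold_range_kloop (patient : String) (e : String × String × Int) (t : Int) (idx : Int)
    (s : List (String × Int) × List String) (h0 : 0 ≤ idx) (hidx : idx < (s.1.length : Int)) :
    (PySem.List.pyRange t 0 1).foldl (fun s k =>
        if pvMem patient e then s
        else
          let c := (PySem.List.pyGetD s.1 idx ("", 0)).1
          if pvMem c e && decide (k ≤ e.2.2) then pvInfect c e s else s) s
    = if pvMem patient e then s
      else if t < 0 ∧ t ≤ e.2.2 then pvInfect (PySem.List.pyGetD s.1 idx ("", 0)).1 e s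
      else s := by
  by_cases hp : pvMem patient e = true
  · rw [if_pos hp]
    exact foldl_fix _ _ _ (fun k _ => by rw [if_pos hp])
  · have hpf : pvMem patient e = false := by simpa using hp
    rw [if_neg hp]
    set c := (PySem.List.pyGetD s.1 idx ("", 0)).1 with hc
    by_cases hlt : t < 0
    · by_cases hd : t ≤ e.2.2
      · by_cases hm : pvMem c e = true
        · rw [if_pos ⟨hlt, hd⟩, PySem.List.pyRange_one_cons hlt, List.foldl_cons, if_neg hp]
          have hfirst :
              (if pvMem ((PySem.List.pyGetD s.1 idx ("", 0)).1) e && decide (t ≤ e.2.2)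
               then pvInfect ((PySem.List.pyGetD s.1 idx ("", 0)).1) e s else s)
              = pvInfect c e s := by
            rw [← hc, if_pos (by simp [hm, hd])]
          rw [hfirst]
          obtain ⟨new, g1, -, -⟩ := pvInfect_shape c e s
          have hstable : (PySem.List.pyGetD (pvInfect c e s).1 idx ("", 0)).1 = c := by
            rw [g1]
            show (PySem.List.pyGetD (s.1 ++ new) idx ("", 0)).1 = c
            rw [pyGetD_append_left s.1 new idx ("", 0) h0 hidx, ← hc]
          apply foldl_fix
          intro k _
          rw [if_neg hp, hstable]
          by_cases hg : (pvMem c e && decide (k ≤ e.2.2)) = true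
          · rw [if_pos hg]; exact pvInfect_idem c e s
          · rw [if_neg hg]
        · have hmf : pvMem c e = false := by simpa using hm
          rw [if_pos ⟨hlt, hd⟩, pvInfect_not_mem c e s hmf]
          apply foldl_fix
          intro k _
          rw [if_neg hp, ← hc, if_neg (by simp [hmf])]
      · rw [if_neg (by tauto)]
        apply foldl_fix
        intro k hk
        have hak : t ≤ k := (PySem.List.mem_pyRange_one.mp hk).1
        rw [if_neg hp, ← hc, if_neg (by simp; intro _; omega)]
    · rw [PySem.List.pyRange_one_eq_nil (by omega), if_neg (by tauto)]
      rfl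

lemma entry_fold (patient : String) (t : Int) (idx : Int) (c : String) :
    ∀ (hist : List (String × String × Int)) (s : List (String × Int) × List String),
    0 ≤ idx → idx < (s.1.length : Int) → (PySem.List.pyGetD s.1 idx ("", 0)).1 = c →
    hist.foldl (fun s e =>
      (PySem.List.pyRange t 0 1).foldl (fun s k =>
        if pvMem patient e then s
        else
          let c := (PySem.List.pyGetD s.1 idx ("", 0)).1
          if pvMem c e && decide (k ≤ e.2.2) then pvInfect c e s else s) s) s
    = bSpread patient hist c t s := by
  intro hist
  induction hist with
  | nil =>
    intro s h0 hidx hc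
    show s = bSpread patient [] c t s
    unfold bSpread
    split <;> rfl
  | cons e hs ih =>
    intro s h0 hidx hc
    rw [List.foldl_cons, fold_range_kloop patient e t idx s h0 hidx]
    have hstep :
        (if pvMem patient e then s
         else if t < 0 ∧ t ≤ e.2.2 then pvInfect (PySem.List.pyGetD s.1 idx ("", 0)).1 e s
         else s)
        = (if e.1 == patient || e.2.1 == patient then s
           else if t < 0 ∧ t ≤ e.2.2 then pvInfect c e s else s) := by
    -- pvMem patient e vs (e.1 == patient || e.2.1 == patient): symmetry of ==
      rw [hc]
      have hsymm : pvMem patient e = (e.1 == patient || e.2.1 == patient) := by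
        rw [Bool.eq_iff_iff]
        simp only [pvMem, Bool.or_eq_true, beq_iff_eq]
        constructor
        · rintro (h | h)
          · exact Or.inl h.symm
          · exact Or.inr h.symm
        · rintro (h | h)
          · exact Or.inl h.symm
          · exact Or.inr h.symm
      rw [hsymm]
    rw [hstep]
    set s1 := (if e.1 == patient || e.2.1 == patient then s
               else if t < 0 ∧ t ≤ e.2.2 then pvInfect c e s else s) with hs1
    have hshape1 : ∃ new, s1 = (s.1 ++ new, s.2 ++ new.map Prod.fst) := by
      rw [hs1]
      by_cases hp : (e.1 == patient || e.2.1 == patient) = true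
      · exact ⟨[], by simp [hp]⟩
      · by_cases hg : t < 0 ∧ t ≤ e.2.2
        · obtain ⟨n1, g1, -, -⟩ := pvInfect_shape c e s
          exact ⟨n1, by rw [if_neg hp, if_pos hg]; exact g1⟩
        · exact ⟨[], by rw [if_neg hp, if_neg hg]; simp⟩
    obtain ⟨n1, hn1⟩ := hshape1
    have hlen1 : idx < (s1.1.length : Int) := by rw [hn1]; simp; omega
    have hc1 : (PySem.List.pyGetD s1.1 idx ("", 0)).1 = c := by
      rw [hn1]
      show (PySem.List.pyGetD (s.1 ++ n1) idx ("", 0)).1 = c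
      rw [pyGetD_append_left s.1 n1 idx ("", 0) h0 hidx, hc]
    rw [ih s1 h0 hlen1 hc1]
    -- now align the single step with bSpread's cons step
    by_cases hlt : t < 0
    · have hexp : s1 = (if e.1 == patient || e.2.1 == patient then s
          else if decide (t ≤ e.2.2) then pvInfect c e s else s) := by
        rw [hs1]
        by_cases hp : (e.1 == patient || e.2.1 == patient) = true
        · simp [hp]
        · rw [if_neg hp, if_neg hp]
          by_cases hd : t ≤ e.2.2
          · rw [if_pos ⟨hlt, hd⟩, if_pos (by simpa using hd)]
          · rw [if_neg (by tauto), if_neg (by simpa using hd)]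
      rw [bSpread, if_pos hlt, bSpread, if_pos hlt, List.foldl_cons, ← hexp]
    · have hs1s : s1 = s := by
        rw [hs1]
        split
        · rfl
        · rw [if_neg (by tauto)]
      rw [bSpread, if_neg hlt, bSpread, if_neg hlt, hs1s]

-- one j-round of A equals sweeping the snapshot of the infected list
lemma aRound_aux (patient : String) (history : List (String × String × Int)) (m n : Int)
    (L : Nat) :
    ∀ (dcount j : Nat) (s : List (String × Int) × List String), j + dcount = L →
    L ≤ s.1.length →
    (PySem.List.pyRange (j : Int) (L : Int) 1).foldl (fun s idx =>
      let day0 := (PySem.List.pyGetD s.1 idx ("", 0)).2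
      history.foldl (fun s e =>
        (PySem.List.pyRange (day0 + (n - m)) 0 1).foldl (fun s k =>
          if pvMem patient e then s
          else
            let c := (PySem.List.pyGetD s.1 idx ("", 0)).1
            if pvMem c e && decide (k ≤ e.2.2) then pvInfect c e s else s) s) s) s
    = sweep patient history m n ((s.1.take L).drop j) s := by
  intro dcount
  induction dcount with
  | zero =>
    intro j s hj hL
    have hjL : j = L := by omega
    subst hjL
    rw [PySem.List.pyRange_one_eq_nil (by omega)]
    have hnil : (s.1.take j).drop j = [] := by
      simp
    rw [hnil]
    rfl
  | succ dcount ih =>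
    intro j s hj hL
    have hjL : j < L := by omega
    rw [PySem.List.pyRange_one_cons (by exact_mod_cast hjL), List.foldl_cons]
    have h0 : (0 : Int) ≤ (j : Int) := by positivity
    have hidx : (j : Int) < (s.1.length : Int) := by exact_mod_cast lt_of_lt_of_le hjL hL
    have hjlen : j < s.1.length := lt_of_lt_of_le hjL hL
    have hget : PySem.List.pyGetD s.1 (j : Int) ("", 0) = s.1[j] := by
      rw [PySem.List.pyGetD_eq_getElem s.1 ("", 0) h0 hidx]
      simp
    set p := s.1[j] with hp
    have hstep := entry_fold patient (p.2 + (n - m)) (j : Int) p.1 history s h0 hidx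
      (by rw [hget])
    have hday : (PySem.List.pyGetD s.1 (j : Int) ("", 0)).2 = p.2 := by rw [hget]
    rw [hday] at *
    rw [hstep]
    set s1 := bSpread patient history p.1 (p.2 + (n - m)) s with hs1
    obtain ⟨n1, g1, -, -⟩ := bSpread_shape patient history p.1 (p.2 + (n - m)) s
    rw [← hs1] at g1
    have hL1 : L ≤ s1.1.length := by rw [g1]; simp; omega
    have ihx := ih (j + 1) s1 (by omega) hL1
    have hcast : ((j : Int) + 1) = ((j + 1 : Nat) : Int) := by push_cast; ring
    rw [hcast, ihx]
    have htake : (s1.1.take L).drop (j + 1) = (s.1.take L).drop (j + 1) := by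
      rw [g1, List.take_append_of_le_length hL]
    have hsnap : (s.1.take L).drop j = p :: (s.1.take L).drop (j + 1) := by
      rw [List.drop_eq_getElem_cons (by simp; omega)]
      congr 1
      rw [hp]
      exact List.getElem_take
    rw [htake, hsnap]
    rfl

lemma aRound_eq_sweep (patient : String) (history : List (String × String × Int)) (m n : Int)
    (s : List (String × Int) × List String) :
    aRound patient history m n s = sweep patient history m n s.1 s := by
  unfold aRound
  have := aRound_aux patient history m n s.1.length s.1.length 0 s (by omega) le_rfl
  simpa using this

-- ---------- the main fixpoint correspondence ----------

lemma main_loop (patient : String) (history : List (String × String × Int)) (m n : Int) :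
    ∀ (fuel : Nat) (P pending : List (String × Int)) (s : List (String × Int) × List String),
    s.1 = P ++ pending →
    s.2 = s.1.map Prod.fst →
    (∀ p ∈ P, bSpread patient history p.1 (p.2 + (n - m)) s = s) →
    (pending = [] ∨ 1 + (spreadNames patient history).countP (fun x => !s.2.contains x) ≤ fuel) →
    aMain patient history m n fuel (P.map Prod.fst) s = bgo patient history m n pending s := by
  intro fuel
  induction fuel with
  | zero =>
    intro P pending s h1 h2 h3 h4
    rcases h4 with h4 | h4
    · subst h4
      rw [aMain_zero, bgo_nil]
    · omega
  | succ fuel ih =>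
    intro P pending s h1 h2 h3 h4
    rcases pending with _ | ⟨⟨c, d0⟩, rest⟩
    · have heq : s.2 = P.map Prod.fst := by rw [h2, h1]; simp
      rw [aMain_succ, if_neg (by simp [heq]), bgo_nil, heq]
    · have hne : s.2 ≠ P.map Prod.fst := by
        rw [h2, h1]
        intro heq
        have := congrArg List.length heq
        simp at this
      rw [aMain_succ, if_pos hne]
      rw [aRound_eq_sweep, h1, sweep_append,
        sweep_fix patient history m n P s h3]
      set pending := (c, d0) :: rest with hpend
      set sw := sweep patient history m n pending s with hsw
      obtain ⟨new, g1, g3⟩ := sweep_shape patient history m n pending s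
      rw [← hsw] at g1
      have hdelta : sw.1.drop s.1.length = new := by rw [g1]; simp
      have hbgo : bgo patient history m n pending s = bgo patient history m n new sw := by
        have := bgo_sweep patient history m n pending [] s
        rw [List.append_nil] at this
        rw [this, hdelta, List.nil_append]
      rw [hbgo]
      have h2' : s.2 = (P ++ pending).map Prod.fst := by rw [h2, h1]
      rw [h2']
      apply ih (P ++ pending) new sw
      · rw [g1, h1]
      · rw [g1, h2, h1]
        simp
      · intro p hp
        rcases List.mem_append.mp hp with hp | hp
        · exact bSpread_self_mono patient history p.1 (p.2 + (n - m)) (h3 p hp)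
            (fun x hx => by rw [hsw]; exact sweep_mem _ _ _ _ _ _ _ hx)
        · rw [hsw]; exact sweep_sat patient history m n pending s p hp
      · rcases new with _ | ⟨q, qs⟩
        · exact Or.inl rfl
        · right
          have hq : q ∈ q :: qs := List.mem_cons_self
          obtain ⟨hq1, hq2⟩ := g3 q hq
          have hqin : q.1 ∈ sw.2 := by
            rw [g1]
            exact List.mem_append_right _ (List.mem_map_of_mem hq)
          have hmono : ∀ x ∈ spreadNames patient history,
              (!sw.2.contains x) = true → (!s.2.contains x) = true := by
            intro x _ hx
            rw [g1] at hx
            simp only [Bool.not_eq_true', List.contains_eq_mem, decide_eq_false_iff_not,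
              List.mem_append, not_or] at hx ⊢
            exact hx.1
          have hlt : (spreadNames patient history).countP (fun x => !sw.2.contains x)
              < (spreadNames patient history).countP (fun x => !s.2.contains x) := by
            refine countP_lt_of_witness hmono q.1 hq1 ?_ ?_
            · simp [List.contains_eq_mem, hqin]
            · simpa [List.contains_eq_mem] using hq2
          have h4' : 1 + (spreadNames patient history).countP (fun x => !s.2.contains x) ≤ fuel + 1 := by
            rcases h4 with h4 | h4
            · simp [hpend] at h4
            · exact h4
          omega

-- ---------- phase 1 ----------

lemma phase1_eq (patient : String) (history : List (String × String × Int)) (m : Int) :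
    history.foldl (fun s e =>
        (PySem.List.pyRange (-m) 0 1).foldl (fun s i =>
          if pvMem patient e && decide (i ≤ e.2.2) then pvInfect patient e s else s) s)
      (([] : List (String × Int)), ([] : List String))
    = (if m ≥ 1 then
        history.foldl (fun s e =>
          if decide (-m ≤ e.2.2) then pvInfect patient e s else s) ([], [])
      else ([], [])) := by
  by_cases hm : (1 : Int) ≤ m
  · rw [if_pos hm]
    apply List.foldl_ext
    intro s e _
    rw [fold_range_infect patient e (-m) s]
    by_cases hd : -m ≤ e.2.2
    · rw [if_pos ⟨by omega, hd⟩, if_pos (by simpa using hd)]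
    · rw [if_neg (by tauto), if_neg (by simpa using hd)]
  · rw [if_neg hm]
    apply foldl_fix
    intro e _
    rw [fold_range_infect patient e (-m) ([], [])]
    rw [if_neg (by push_neg at hm; intro hcon; omega)]

lemma phase1_shape (patient : String) (history : List (String × String × Int)) (m : Int) :
    ∀ (s : List (String × Int) × List String),
    ∃ new : List (String × Int),
      history.foldl (fun s e =>
          if decide (-m ≤ e.2.2) then pvInfect patient e s else s) s
        = (s.1 ++ new, s.2 ++ new.map Prod.fst) := by
  induction history with
  | nil => intro s; exact ⟨[], by simp⟩
  | cons e hs ih =>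
    intro s
    by_cases hd : -m ≤ e.2.2
    · obtain ⟨n1, g1, -, -⟩ := pvInfect_shape patient e s
      obtain ⟨n2, g2⟩ := ih (pvInfect patient e s)
      refine ⟨n1 ++ n2, ?_⟩
      rw [List.foldl_cons, if_pos (by simpa using hd), g2, g1]
      simp [List.append_assoc]
    · obtain ⟨n2, g2⟩ := ih s
      refine ⟨n2, ?_⟩
      rw [List.foldl_cons, if_neg (by simpa using hd)]
      exact g2

lemma phase1_empty_of_no_mem (patient : String) (history : List (String × String × Int))
    (m : Int) (h : ∀ e ∈ history, pvMem patient e = false) :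
    history.foldl (fun s e =>
        if decide (-m ≤ e.2.2) then pvInfect patient e s else s)
      (([] : List (String × Int)), ([] : List String)) = ([], []) := by
  apply foldl_fix
  intro e he
  by_cases hd : -m ≤ e.2.2
  · rw [if_pos (by simpa using hd)]
    exact pvInfect_not_mem patient e _ (h e he)
  · rw [if_neg (by simpa using hd)]

lemma spreadNames_length (patient : String) (history : List (String × String × Int)) :
    (spreadNames patient history).length
      = 2 * (history.filter fun e => !(e.1 == patient || e.2.1 == patient)).length := by
  unfold spreadNames
  generalize (history.filter fun e => !(e.1 == patient || e.2.1 == patient)) = l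
  induction l with
  | nil => rfl
  | cons a l ih => simp [List.flatMap_cons, ih]; omega

-- ===== VERDICT (by name: the statement is the Claim_ definition above) =====

theorem trace_contacts_2_spec : Claim_equal_trace_contacts_2 := by
  intro patient history m n _
  unfold Spec_trace_contacts_2 trace_contacts_2 trace_contacts_2_alt
  rw [phase1_eq patient history m]
  set s0 : List (String × Int) × List String :=
    (if m ≥ 1 then
      history.foldl (fun s e =>
        if decide (-m ≤ e.2.2) then pvInfect patient e s else s) ([], [])
    else ([], [])) with hs0
  have hsync : s0.2 = s0.1.map Prod.fst := by
    rw [hs0]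
    by_cases hm : m ≥ 1
    · rw [if_pos hm]
      obtain ⟨new, g⟩ := phase1_shape patient history m ([], [])
      rw [g]
      simp
    · rw [if_neg hm]
      rfl
  have := main_loop patient history m n (history.length * history.length) [] s0.1 s0
    (by simp) hsync (by simp) ?_
  · simpa using this
  · rcases heq : s0.1 with _ | ⟨q, qs⟩
    · exact Or.inl rfl
    · right
      -- some entry of history mentions the patient, so at most |history|-1 entries can spread
      have hmem : ∃ e ∈ history, pvMem patient e = true := by
        by_contra hno
        push_neg at hno
        have hall : ∀ e ∈ history, pvMem patient e = false := by
          intro e he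
          simpa using hno e he
        have : s0.1 = [] := by
          rw [hs0]
          by_cases hm : m ≥ 1
          · rw [if_pos hm, phase1_empty_of_no_mem patient history m hall]
          · rw [if_neg hm]
        rw [heq] at this
        simp at this
      obtain ⟨e, he, hpe⟩ := hmem
      have hfilt : (history.filter fun e => !(e.1 == patient || e.2.1 == patient)).length
          < history.length := by
        rw [List.length_filter_lt_length_iff_exists]
        refine ⟨e, he, ?_⟩
        unfold pvMem at hpe
        simp only [Bool.or_eq_true, beq_iff_eq] at hpe
        simp only [Bool.not_eq_true', Bool.not_eq_false, Bool.or_eq_true, beq_iff_eq]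
        rcases hpe with h | h
        · exact Or.inl h.symm
        · exact Or.inr h.symm
      have hcount : (spreadNames patient history).countP (fun x => !s0.2.contains x)
          ≤ (spreadNames patient history).length := List.countP_le_length
      rw [spreadNames_length patient history] at hcount
      have hH : 1 ≤ history.length := by
        rcases history with _ | _
        · simp at he
        · simp
      by_cases h2 : 2 ≤ history.length
      · have hmul : 2 * history.length ≤ history.length * history.length :=
          Nat.mul_le_mul_right _ h2
        omega
      · have hone : history.length = 1 := by omega
        rw [hone] at hfilt ⊢
        omega
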